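-- pv_equiv track=rewrite | github.com/data-to-insight/ssd-data-model-next | scripts/legacy.schema.enrich_node_categories.py | infer_domain_from_field_tags
-- ===== SOURCE A (Python) =====
-- from collections import defaultdict
--
-- DOMAIN_MAP = {
--     "cla": [
--         "looked_after", "care_plan", "placement", "substance_misuse", "visits", "reviews", "episodes"
--     ],
--     "cin": [
--         "child_in_need", "assessment", "plan", "referral", "visit", "factors", "need", "contact"
--     ],
--     "cp": [
--         "child_protection", "conference", "cp_plan", "review", "visit", "pre_proceedings",
--         "s47_enquiry", "initial_cp_conference"
--     ],
--     "identity": [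
--         "identity", "address", "linked_identifiers",  "immigration", "mother", "convictions", "sdq", "voice_of_child"
--     ],
--     "health": [
--         "health", "disability", "immunisations"
--     ],
--     "ehcp": [
--         "ehcp", "ehcp_request", "ehcp_assessment"
--     ],
--     "send": [
--         "send"
--     ],
--     "early_help": [
--         "early_help", "family"
--     ],
--     "care_leavers": [
--         "care_leavers", "adoption", "permanence"
--     ],
--     "finance": [
--         "finance"
--     ],
--     "workforce": [
--         "workforce"
--     ],
--     "ssd_admin": [
--         "admin"
--     ]
-- }
--
-- def infer_domain_from_field_tags(field_tags):
--     domain_counts = defaultdict(int)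
--     for tag in field_tags:
--         for domain, valid_tags in DOMAIN_MAP.items():
--             if tag in valid_tags:
--                 domain_counts[domain] += 1
--     if len(domain_counts) == 1:
--         return next(iter(domain_counts))
--     return None
-- ===== SOURCE B (Python) =====
-- # Inverted index: tag -> domains containing it (precomputed once from DOMAIN_MAP).
-- TAG_TO_DOMAINS = {
--     'looked_after': ['cla'],
--     'care_plan': ['cla'],
--     'placement': ['cla'],
--     'substance_misuse': ['cla'],
--     'visits': ['cla'],
--     'reviews': ['cla'],
--     'episodes': ['cla'],
--     'child_in_need': ['cin'],
--     'assessment': ['cin'],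
--     'plan': ['cin'],
--     'referral': ['cin'],
--     'visit': ['cin', 'cp'],
--     'factors': ['cin'],
--     'need': ['cin'],
--     'contact': ['cin'],
--     'child_protection': ['cp'],
--     'conference': ['cp'],
--     'cp_plan': ['cp'],
--     'review': ['cp'],
--     'pre_proceedings': ['cp'],
--     's47_enquiry': ['cp'],
--     'initial_cp_conference': ['cp'],
--     'identity': ['identity'],
--     'address': ['identity'],
--     'linked_identifiers': ['identity'],
--     'immigration': ['identity'],
--     'mother': ['identity'],
--     'convictions': ['identity'],
--     'sdq': ['identity'],
--     'voice_of_child': ['identity'],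
--     'health': ['health'],
--     'disability': ['health'],
--     'immunisations': ['health'],
--     'ehcp': ['ehcp'],
--     'ehcp_request': ['ehcp'],
--     'ehcp_assessment': ['ehcp'],
--     'send': ['send'],
--     'early_help': ['early_help'],
--     'family': ['early_help'],
--     'care_leavers': ['care_leavers'],
--     'adoption': ['care_leavers'],
--     'permanence': ['care_leavers'],
--     'finance': ['finance'],
--     'workforce': ['workforce'],
--     'admin': ['ssd_admin']
-- }
--
-- def infer_domain_from_field_tags(field_tags):
--     # Single pass over the tags with an O(1) inverted-index lookup: collect the
--     # distinct matched domains; return the sole one, else None.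
--     matched = []
--     for tag in field_tags:
--         for d in TAG_TO_DOMAINS.get(tag, []):
--             if d not in matched:
--                 matched.append(d)
--     return matched[0] if len(matched) == 1 else None
-- ===== Notes on version B (the rewrite author's own statement) =====
-- stated objective: faster
-- what changed: Replaces the nested per-tag scan over DOMAIN_MAP counted into a defaultdict with a precomputed inverted index (tag -> domains) queried once per tag, collecting the distinct matched domains in a single pass.
import Mathlib
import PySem

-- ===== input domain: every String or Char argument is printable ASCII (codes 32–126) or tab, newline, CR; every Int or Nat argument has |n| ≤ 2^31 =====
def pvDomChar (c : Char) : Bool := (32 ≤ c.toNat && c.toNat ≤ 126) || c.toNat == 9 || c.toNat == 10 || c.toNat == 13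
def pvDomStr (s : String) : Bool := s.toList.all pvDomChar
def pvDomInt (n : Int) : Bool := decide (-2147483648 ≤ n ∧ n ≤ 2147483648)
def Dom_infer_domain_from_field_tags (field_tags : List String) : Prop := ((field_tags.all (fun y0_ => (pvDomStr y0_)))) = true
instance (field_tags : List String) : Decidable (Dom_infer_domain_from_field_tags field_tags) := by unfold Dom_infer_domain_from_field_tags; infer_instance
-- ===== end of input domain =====

-- B replaces A's per-tag scan over DOMAIN_MAP with a precomputed inverted index
-- (tag -> domains) and a single pass collecting distinct matched domains (faster lookup structure).


-- DOMAIN_MAP, a module-level dict literal (insertion order preserved)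
def domainMap : List (String × List String) :=
  [("cla", ["looked_after", "care_plan", "placement", "substance_misuse", "visits", "reviews", "episodes"]),
   ("cin", ["child_in_need", "assessment", "plan", "referral", "visit", "factors", "need", "contact"]),
   ("cp", ["child_protection", "conference", "cp_plan", "review", "visit", "pre_proceedings",
           "s47_enquiry", "initial_cp_conference"]),
   ("identity", ["identity", "address", "linked_identifiers", "immigration", "mother", "convictions", "sdq", "voice_of_child"]),
   ("health", ["health", "disability", "immunisations"]),
   ("ehcp", ["ehcp", "ehcp_request", "ehcp_assessment"]),
   ("send", ["send"]),
   ("early_help", ["early_help", "family"]),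
   ("care_leavers", ["care_leavers", "adoption", "permanence"]),
   ("finance", ["finance"]),
   ("workforce", ["workforce"]),
   ("ssd_admin", ["admin"])]

-- ===== PORT A =====
-- for tag in field_tags: for domain, valid_tags in DOMAIN_MAP.items(): if tag in valid_tags: domain_counts[domain] += 1
def infer_domain_from_field_tags (field_tags : List String) : Option String :=
  let counts : PySem.Dict String Int :=
    field_tags.foldl (fun d tag =>
      domainMap.foldl (fun d2 dv =>
        if dv.2.contains tag then d2.modify dv.1 0 (· + 1) else d2) d)
      PySem.Dict.empty
  if counts.keys.length = 1 then counts.keys.head? else none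

-- ===== PORT B =====
-- TAG_TO_DOMAINS, the inverted index of DOMAIN_MAP (a module-level dict literal in Source B)
def tagToDomains : PySem.Dict String (List String) := PySem.Dict.mk
  [("looked_after", ["cla"]),
   ("care_plan", ["cla"]),
   ("placement", ["cla"]),
   ("substance_misuse", ["cla"]),
   ("visits", ["cla"]),
   ("reviews", ["cla"]),
   ("episodes", ["cla"]),
   ("child_in_need", ["cin"]),
   ("assessment", ["cin"]),
   ("plan", ["cin"]),
   ("referral", ["cin"]),
   ("visit", ["cin", "cp"]),
   ("factors", ["cin"]),
   ("need", ["cin"]),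
   ("contact", ["cin"]),
   ("child_protection", ["cp"]),
   ("conference", ["cp"]),
   ("cp_plan", ["cp"]),
   ("review", ["cp"]),
   ("pre_proceedings", ["cp"]),
   ("s47_enquiry", ["cp"]),
   ("initial_cp_conference", ["cp"]),
   ("identity", ["identity"]),
   ("address", ["identity"]),
   ("linked_identifiers", ["identity"]),
   ("immigration", ["identity"]),
   ("mother", ["identity"]),
   ("convictions", ["identity"]),
   ("sdq", ["identity"]),
   ("voice_of_child", ["identity"]),
   ("health", ["health"]),
   ("disability", ["health"]),
   ("immunisations", ["health"]),
   ("ehcp", ["ehcp"]),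
   ("ehcp_request", ["ehcp"]),
   ("ehcp_assessment", ["ehcp"]),
   ("send", ["send"]),
   ("early_help", ["early_help"]),
   ("family", ["early_help"]),
   ("care_leavers", ["care_leavers"]),
   ("adoption", ["care_leavers"]),
   ("permanence", ["care_leavers"]),
   ("finance", ["finance"]),
   ("workforce", ["workforce"]),
   ("admin", ["ssd_admin"])]

-- for tag in field_tags: for d in TAG_TO_DOMAINS.get(tag, []): if d not in matched: matched.append(d)
def infer_domain_from_field_tags_alt (field_tags : List String) : Option String :=
  let matched : List String :=
    field_tags.foldl (fun acc tag =>
      (tagToDomains.getD tag []).foldl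
        (fun acc2 d => if acc2.contains d then acc2 else acc2 ++ [d]) acc) []
  if matched.length = 1 then matched.head? else none

-- ===== PRECONDITION & SPEC =====
def Spec_infer_domain_from_field_tags (field_tags : List String) (out : Option String) : Prop := out = infer_domain_from_field_tags_alt field_tags
instance (field_tags : List String) (out : Option String) : Decidable (Spec_infer_domain_from_field_tags field_tags out) := by unfold Spec_infer_domain_from_field_tags; infer_instance

-- ===== CLAIM (what is proved, stated in full; the proofs are below) =====
def Claim_equal_infer_domain_from_field_tags : Prop := ∀ (field_tags : List String), Dom_infer_domain_from_field_tags field_tags → Spec_infer_domain_from_field_tags field_tags (infer_domain_from_field_tags field_tags)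

-- ===== LEMMAS AND PROOFS =====


-- ---- A side: keys of the count dict ----
theorem inner_keys_mem (l : List (String × List String)) (tag : String)
    (d : PySem.Dict String Int) (x : String) :
    x ∈ (l.foldl (fun d2 dv => if dv.2.contains tag then d2.modify dv.1 0 (· + 1) else d2) d).keys ↔
      x ∈ d.keys ∨ ∃ dv ∈ l, dv.1 = x ∧ dv.2.contains tag = true := by
  induction l generalizing d with
  | nil => simp
  | cons p t ih =>
    simp only [List.foldl_cons]
    by_cases h : p.2.contains tag
    · simp only [h, if_pos, ih, PySem.Dict.keys_modify, PySem.Dict.mem_keys_insert]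
      constructor
      · rintro ((rfl | hx) | ⟨dv, hdv, rfl, hc⟩)
        · exact Or.inr ⟨p, List.mem_cons_self .., rfl, h⟩
        · exact Or.inl hx
        · exact Or.inr ⟨dv, List.mem_cons_of_mem _ hdv, rfl, hc⟩
      · rintro (hx | ⟨dv, hdv, rfl, hc⟩)
        · exact Or.inl (Or.inr hx)
        · rcases List.mem_cons.mp hdv with rfl | hdv
          · exact Or.inl (Or.inl rfl)
          · exact Or.inr ⟨dv, hdv, rfl, hc⟩
    · simp only [h, ih, Bool.false_eq_true]
      constructor
      · rintro (hx | ⟨dv, hdv, rfl, hc⟩)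
        · exact Or.inl hx
        · exact Or.inr ⟨dv, List.mem_cons_of_mem _ hdv, rfl, hc⟩
      · rintro (hx | ⟨dv, hdv, rfl, hc⟩)
        · exact Or.inl hx
        · rcases List.mem_cons.mp hdv with rfl | hdv
          · exact absurd hc h
          · exact Or.inr ⟨dv, hdv, rfl, hc⟩

theorem inner_keys_nodup (l : List (String × List String)) (tag : String)
    (d : PySem.Dict String Int) (h : d.keys.Nodup) :
    (l.foldl (fun d2 dv => if dv.2.contains tag then d2.modify dv.1 0 (· + 1) else d2) d).keys.Nodup := by
  induction l generalizing d with
  | nil => simpa using h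
  | cons p t ih =>
    simp only [List.foldl_cons]
    by_cases hc : p.2.contains tag
    · simp only [hc, if_pos]
      exact ih _ (by rw [PySem.Dict.keys_modify]; exact PySem.Dict.nodup_keys_insert _ _ _ h)
    · rw [if_neg hc]
      exact ih _ h

theorem outer_keys_mem (tags : List String) (d : PySem.Dict String Int) (x : String) :
    x ∈ (tags.foldl (fun d tag =>
          domainMap.foldl (fun d2 dv => if dv.2.contains tag then d2.modify dv.1 0 (· + 1) else d2) d) d).keys ↔
      x ∈ d.keys ∨ ∃ tag ∈ tags, ∃ dv ∈ domainMap, dv.1 = x ∧ dv.2.contains tag = true := by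
  induction tags generalizing d with
  | nil => simp
  | cons tg t ih =>
    simp only [List.foldl_cons, ih, inner_keys_mem]
    constructor
    · rintro ((hx | ⟨dv, hdv, rfl, hc⟩) | ⟨tag, htag, hrest⟩)
      · exact Or.inl hx
      · exact Or.inr ⟨tg, List.mem_cons_self .., dv, hdv, rfl, hc⟩
      · exact Or.inr ⟨tag, List.mem_cons_of_mem _ htag, hrest⟩
    · rintro (hx | ⟨tag, htag, hrest⟩)
      · exact Or.inl (Or.inl hx)
      · rcases List.mem_cons.mp htag with rfl | htag
        · exact Or.inl (Or.inr hrest)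
        · exact Or.inr ⟨tag, htag, hrest⟩

theorem outer_keys_nodup (tags : List String) (d : PySem.Dict String Int) (h : d.keys.Nodup) :
    (tags.foldl (fun d tag =>
      domainMap.foldl (fun d2 dv => if dv.2.contains tag then d2.modify dv.1 0 (· + 1) else d2) d) d).keys.Nodup := by
  induction tags generalizing d with
  | nil => simpa using h
  | cons tg t ih => exact ih _ (inner_keys_nodup _ _ _ h)

-- ---- B side: the distinct-append accumulator ----
theorem dedup_fold_mem (l acc : List String) (x : String) :
    x ∈ l.foldl (fun a d => if a.contains d then a else a ++ [d]) acc ↔ x ∈ acc ∨ x ∈ l := by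
  induction l generalizing acc with
  | nil => simp
  | cons h t ih =>
    simp only [List.foldl_cons]
    by_cases hc : acc.contains h = true
    · rw [if_pos hc, ih]
      have hm := List.contains_iff_mem.mp hc
      simp only [List.mem_cons]
      constructor
      · rintro (hx | hx)
        · exact Or.inl hx
        · exact Or.inr (Or.inr hx)
      · rintro (hx | rfl | hx)
        · exact Or.inl hx
        · exact Or.inl hm
        · exact Or.inr hx
    · rw [if_neg hc, ih]
      simp only [List.mem_append, List.mem_cons]
      tauto

theorem dedup_fold_nodup (l acc : List String) (h : acc.Nodup) :
    (l.foldl (fun a d => if a.contains d then a else a ++ [d]) acc).Nodup := by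
  induction l generalizing acc with
  | nil => simpa using h
  | cons hd t ih =>
    simp only [List.foldl_cons]
    by_cases hc : acc.contains hd = true
    · rw [if_pos hc]; exact ih _ h
    · rw [if_neg hc]
      have hm : hd ∉ acc := fun m => hc (List.contains_iff_mem.mpr m)
      exact ih _ (h.append (List.nodup_singleton _) (List.disjoint_singleton.mpr hm))

theorem matched_mem (tags acc : List String) (x : String) :
    x ∈ tags.foldl (fun acc tag =>
        (tagToDomains.getD tag []).foldl
          (fun acc2 d => if acc2.contains d then acc2 else acc2 ++ [d]) acc) acc ↔
      x ∈ acc ∨ ∃ tag ∈ tags, x ∈ tagToDomains.getD tag [] := by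
  induction tags generalizing acc with
  | nil => simp
  | cons tg t ih =>
    simp only [List.foldl_cons, ih, dedup_fold_mem]
    constructor
    · rintro ((hx | hx) | ⟨tag, htag, hx⟩)
      · exact Or.inl hx
      · exact Or.inr ⟨tg, List.mem_cons_self .., hx⟩
      · exact Or.inr ⟨tag, List.mem_cons_of_mem _ htag, hx⟩
    · rintro (hx | ⟨tag, htag, hx⟩)
      · exact Or.inl (Or.inl hx)
      · rcases List.mem_cons.mp htag with rfl | htag
        · exact Or.inl (Or.inr hx)
        · exact Or.inr ⟨tag, htag, hx⟩

theorem matched_nodup (tags : List String) :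
    (tags.foldl (fun acc tag =>
        (tagToDomains.getD tag []).foldl
          (fun acc2 d => if acc2.contains d then acc2 else acc2 ++ [d]) acc) []).Nodup := by
  have : ∀ acc : List String, acc.Nodup → (tags.foldl (fun acc tag =>
      (tagToDomains.getD tag []).foldl
        (fun acc2 d => if acc2.contains d then acc2 else acc2 ++ [d]) acc) acc).Nodup := by
    induction tags with
    | nil => intro acc h; simpa using h
    | cons tg t ih => intro acc h; exact ih _ (dedup_fold_nodup _ _ h)
  exact this [] (List.nodup_nil)

-- ---- the inverted index agrees with DOMAIN_MAP as a (tag, domain) relation ----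
theorem tagToDomains_keys_nodup : tagToDomains.keys.Nodup := by decide

theorem lookup_mem (tag x : String) :
    x ∈ tagToDomains.getD tag [] ↔ ∃ p ∈ tagToDomains.items, p.1 = tag ∧ x ∈ p.2 := by
  rcases h : tagToDomains.get? tag with _ | v
  · rw [PySem.Dict.getD_of_get?_eq_none _ _ h]
    simp only [List.not_mem_nil, false_iff]
    rintro ⟨p, hp, rfl, hx⟩
    have := (PySem.Dict.get?_eq_some_iff_mem_items tagToDomains _ _ tagToDomains_keys_nodup).mpr
      (show (p.1, p.2) ∈ tagToDomains.items from hp)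
    simp [h] at this
  · rw [PySem.Dict.getD_of_get?_eq_some _ _ h]
    constructor
    · intro hx
      exact ⟨(tag, v), PySem.Dict.mem_items_of_get?_eq_some _ h, rfl, hx⟩
    · rintro ⟨p, hp, rfl, hx⟩
      have := (PySem.Dict.get?_eq_some_iff_mem_items tagToDomains _ _ tagToDomains_keys_nodup).mpr
        (show (p.1, p.2) ∈ tagToDomains.items from hp)
      rw [h] at this
      rw [← Option.some_inj.mp this] at hx
      exact hx

def pairsB : List (String × String) :=
  tagToDomains.items.flatMap (fun p => p.2.map (fun d => (p.1, d)))

def pairsA : List (String × String) :=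
  domainMap.flatMap (fun dv => dv.2.map (fun t => (t, dv.1)))

theorem pairs_agree : ∀ q ∈ pairsB, q ∈ pairsA := by decide

theorem pairs_agree' : ∀ q ∈ pairsA, q ∈ pairsB := by decide

theorem relation_eq (tag x : String) :
    (∃ p ∈ tagToDomains.items, p.1 = tag ∧ x ∈ p.2) ↔
      ∃ dv ∈ domainMap, dv.1 = x ∧ tag ∈ dv.2 := by
  have hB : (tag, x) ∈ pairsB ↔ ∃ p ∈ tagToDomains.items, p.1 = tag ∧ x ∈ p.2 := by
    simp only [pairsB, List.mem_flatMap, List.mem_map, Prod.mk.injEq]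
    constructor
    · rintro ⟨p, hp, d, hd, rfl, rfl⟩; exact ⟨p, hp, rfl, hd⟩
    · rintro ⟨p, hp, rfl, hx⟩; exact ⟨p, hp, x, hx, rfl, rfl⟩
  have hA : (tag, x) ∈ pairsA ↔ ∃ dv ∈ domainMap, dv.1 = x ∧ tag ∈ dv.2 := by
    simp only [pairsA, List.mem_flatMap, List.mem_map, Prod.mk.injEq]
    constructor
    · rintro ⟨dv, hdv, t, ht, rfl, rfl⟩; exact ⟨dv, hdv, rfl, ht⟩
    · rintro ⟨dv, hdv, rfl, ht⟩; exact ⟨dv, hdv, tag, ht, rfl, rfl⟩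
  rw [← hB, ← hA]
  exact ⟨fun h => pairs_agree _ h, fun h => pairs_agree' _ h⟩

-- the two result lists are permutations of each other
theorem keys_perm_matched (field_tags : List String) :
    ((field_tags.foldl (fun d tag =>
        domainMap.foldl (fun d2 dv => if dv.2.contains tag then d2.modify dv.1 0 (· + 1) else d2) d)
        (PySem.Dict.empty : PySem.Dict String Int)).keys).Perm
      (field_tags.foldl (fun acc tag =>
        (tagToDomains.getD tag []).foldl
          (fun acc2 d => if acc2.contains d then acc2 else acc2 ++ [d]) acc) []) := by
  rw [List.perm_ext_iff_of_nodup
    (outer_keys_nodup _ (PySem.Dict.empty : PySem.Dict String Int) (by simp [PySem.Dict.keys_empty]))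
    (matched_nodup field_tags)]
  intro x
  rw [outer_keys_mem, matched_mem]
  simp only [PySem.Dict.keys_empty, List.not_mem_nil, false_or]
  constructor
  · rintro ⟨tag, htag, dv, hdv, rfl, hc⟩
    refine ⟨tag, htag, ?_⟩
    rw [lookup_mem, relation_eq]
    exact ⟨dv, hdv, rfl, List.contains_iff_mem.mp hc⟩
  · rintro ⟨tag, htag, hx⟩
    rw [lookup_mem, relation_eq] at hx
    rcases hx with ⟨dv, hdv, rfl, ht⟩
    exact ⟨tag, htag, dv, hdv, rfl, List.contains_iff_mem.mpr ht⟩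

-- ===== VERDICT =====
theorem infer_domain_from_field_tags_spec : Claim_equal_infer_domain_from_field_tags := by
  intro field_tags _
  unfold Spec_infer_domain_from_field_tags infer_domain_from_field_tags infer_domain_from_field_tags_alt
  dsimp only []
  have hperm := keys_perm_matched field_tags
  set K := (field_tags.foldl (fun d tag =>
      domainMap.foldl (fun d2 dv => if dv.2.contains tag then d2.modify dv.1 0 (· + 1) else d2) d)
      (PySem.Dict.empty : PySem.Dict String Int)).keys with hK
  set M := field_tags.foldl (fun acc tag =>
      (tagToDomains.getD tag []).foldl
        (fun acc2 d => if acc2.contains d then acc2 else acc2 ++ [d]) acc) [] with hM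
  have hlen : K.length = M.length := hperm.length_eq
  by_cases h1 : K.length = 1
  · rcases List.length_eq_one_iff.mp h1 with ⟨a, ha⟩
    have hMa : M = [a] := List.perm_singleton.mp ((ha ▸ hperm).symm)
    rw [if_pos h1, if_pos (hlen ▸ h1), ha, hMa]
  · rw [if_neg h1, if_neg (by rw [← hlen]; exact h1)]
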